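-- pv_equiv track=rewrite | github.com/bush-codes/nachomud | nachomud/engine/game.py | _strip_connector
-- ===== SOURCE A (Python) =====
-- _CONNECTOR_PREFIXES = ("about ", "that ", "regarding ", "concerning ", "of ",
--                        "if ", "whether ", "where ", "what ", "why ", "how ",
--                        "who ", "when ")
--
-- def _strip_connector(text: str) -> str:
--     """Strip a leading 'about ', 'that ', etc. from the message after the NPC
--     name, so 'Marta about her food' yields message 'her food'."""
--     t = text.strip()
--     low = t.lower()
--     for prefix in _CONNECTOR_PREFIXES:
--         if low.startswith(prefix):
--             # Keep question words; only consume pure connectors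
--             if prefix in ("about ", "that ", "regarding ", "concerning ", "of "):
--                 t = t[len(prefix):].strip()
--             break
--     return t
-- ===== SOURCE B (Python) =====
-- _CONSUMERS = {"about", "that", "regarding", "concerning", "of"}
--
-- def _strip_connector(text: str) -> str:
--     """Strip a leading connector word by splitting off the first token and
--     looking it up in a set, instead of scanning a tuple of prefixes."""
--     t = text.strip()
--     parts = t.split(" ", 1)
--     if len(parts) == 2 and parts[0].lower() in _CONSUMERS:
--         return parts[1].strip()
--     return t
-- ===== Notes on version B (the rewrite author's own statement) =====
-- stated objective: simpler
-- what changed: Replaces A's ordered scan over a 13-prefix tuple (case-folded startswith on each, with a break) by one single-space split of the stripped text into first token and remainder, looking the lowercased first token up in a set of the five consumer words; the question-word prefixes, which A checks but never consumes, disappear entirely.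
import Mathlib
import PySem

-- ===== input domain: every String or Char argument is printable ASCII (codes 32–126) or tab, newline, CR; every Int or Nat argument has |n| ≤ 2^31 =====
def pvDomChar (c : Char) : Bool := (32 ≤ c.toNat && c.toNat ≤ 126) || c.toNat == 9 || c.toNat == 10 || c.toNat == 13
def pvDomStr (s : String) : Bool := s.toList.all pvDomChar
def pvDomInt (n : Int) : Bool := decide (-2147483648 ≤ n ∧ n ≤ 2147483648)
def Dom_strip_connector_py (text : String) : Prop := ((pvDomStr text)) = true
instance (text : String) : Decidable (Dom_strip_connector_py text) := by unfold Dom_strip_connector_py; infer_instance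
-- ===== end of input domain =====

-- B replaces A's scan over the 13-prefix tuple by splitting off the first token once and
-- looking it up in a set of the five consumer words (objective: simpler; same return value).

-- ===== PORT A =====
def pvConnectorPrefixes : List String :=
  ["about ", "that ", "regarding ", "concerning ", "of ",
   "if ", "whether ", "where ", "what ", "why ", "how ",
   "who ", "when "]

-- the 'for prefix in _CONNECTOR_PREFIXES: … break' loop, one recursive step per prefix
def pvStripLoop (t low : String) : List String → String
  | [] => t
  | p :: ps =>
    if PySem.Str.startswith low p then
      if ["about ", "that ", "regarding ", "concerning ", "of "].contains p then
        PySem.Str.strip (PySem.Str.slice t (some (PySem.Str.len p)) none)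
      else t
    else pvStripLoop t low ps

def strip_connector_py (text : String) : String :=
  let t := PySem.Str.strip text
  let low := PySem.Str.lower t
  pvStripLoop t low pvConnectorPrefixes

-- ===== PORT B =====
def pvConsumers : List String := PySem.Set.ofList ["about", "that", "regarding", "concerning", "of"]

def strip_connector_py_alt (text : String) : String :=
  let t := PySem.Str.strip text
  match PySem.Str.splitMax? t " " 1 with
  | some [h, r] =>                                    -- len(parts) == 2
      if PySem.Str.lower h ∈ pvConsumers then PySem.Str.strip r else t
  | _ => t

-- ===== PRECONDITION & SPEC =====
def Spec_strip_connector_py (text : String) (out : String) : Prop := out = strip_connector_py_alt text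
instance (text : String) (out : String) : Decidable (Spec_strip_connector_py text out) := by unfold Spec_strip_connector_py; infer_instance

-- ===== CLAIM (what is proved, stated in full; the proofs are below) =====
def Claim_equal_strip_connector_py : Prop := ∀ (text : String), Dom_strip_connector_py text → Spec_strip_connector_py text (strip_connector_py text)

-- ===== LEMMAS AND PROOFS =====

theorem pvBoolEqDecide {b : Bool} {p : Prop} [Decidable p] (h : b = true ↔ p) : b = decide p := by
  cases b <;> simp_all

theorem pvLowerChar_eq_space_iff (c : Char) : PySem.Chars.lowerChar c = ' ' ↔ c = ' ' := by
  constructor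
  · intro h
    unfold PySem.Chars.lowerChar at h
    split at h
    · next hu =>
      unfold PySem.Chars.isupper at hu
      simp only [Bool.and_eq_true, decide_eq_true_eq, Char.le_def, UInt32.le_iff_toNat_le] at hu
      exfalso
      have hZ : c.val.toNat ≤ 90 := hu.2
      have hA : 65 ≤ c.val.toNat := hu.1
      have hcn : c.toNat = c.val.toNat := rfl
      have hv : Nat.isValidChar (c.toNat + 32) := Or.inl (by omega)
      have h2 := congrArg Char.toNat h
      rw [show (Char.ofNat (c.toNat + 32)).toNat = c.toNat + 32 from by simp [Char.ofNat, hv]] at h2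
      have hsp : (' ' : Char).toNat = 32 := rfl
      omega
    · exact h
  · intro h; subst h; decide

theorem pvGoZero (fuel : Nat) (l cur : List Char) (acc : List (List Char)) :
    PySem.Chars.splitOnMax.go [' '] fuel 0 l cur acc = ((cur.reverse ++ l) :: acc).reverse := by
  cases fuel <;> cases l <;> simp [PySem.Chars.splitOnMax.go]

theorem pvGoOne (l : List Char) : ∀ (fuel : Nat) (cur : List Char) (acc : List (List Char)),
    l.length < fuel →
    PySem.Chars.splitOnMax.go [' '] fuel 1 l cur acc =
      (if ' ' ∈ l
       then acc.reverse ++ [cur.reverse ++ l.takeWhile (· ≠ ' '), (l.dropWhile (· ≠ ' ')).tail]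
       else acc.reverse ++ [cur.reverse ++ l]) := by
  induction l with
  | nil =>
    intro fuel cur acc hf
    match fuel, hf with
    | fuel + 1, _ => simp [PySem.Chars.splitOnMax.go]
  | cons c rest ih =>
    intro fuel cur acc hf
    match fuel, hf with
    | fuel + 1, hf =>
      by_cases hc : c = ' '
      · subst hc
        simp only [PySem.Chars.splitOnMax.go, List.isPrefixOf, BEq.rfl, Bool.true_and,
          if_true, if_neg (by omega : ¬ (1 : Nat) = 0)]
        rw [pvGoZero]
        simp [List.takeWhile, List.dropWhile]
      · have hpre : [' '].isPrefixOf (c :: rest) = false := by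
          simp [List.isPrefixOf]
          exact fun h => absurd h.symm hc
        simp only [PySem.Chars.splitOnMax.go, hpre, if_neg (by omega : ¬ (1 : Nat) = 0),
          Bool.false_eq_true, if_false]
        rw [ih fuel (c :: cur) acc (by simpa using Nat.lt_of_succ_lt_succ hf)]
        by_cases hm : ' ' ∈ rest
        · simp [hm, hc, List.takeWhile, List.dropWhile, Ne.symm hc]
        · simp [hm, Ne.symm hc]

theorem pvSplit1 (t : String) :
    PySem.Str.splitMax? t " " 1 =
      some (if ' ' ∈ t.toList
            then [String.ofList (t.toList.takeWhile (· ≠ ' ')),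
                  String.ofList ((t.toList.dropWhile (· ≠ ' ')).tail)]
            else [t]) := by
  have hsep : " ".toList = [' '] := rfl
  unfold PySem.Str.splitMax? PySem.Chars.splitMax? PySem.Chars.splitOnMax
  rw [hsep]
  simp only [List.isEmpty_cons, if_false, Bool.false_eq_true]
  rw [if_neg (by omega : ¬ (1 : ℤ) < 0), show Int.toNat 1 = 1 from rfl]
  rw [pvGoOne t.toList (t.toList.length + 1) [] [] (by omega)]
  by_cases hm : ' ' ∈ t.toList
  · simp [hm]
  · simp [hm, String.ofList_toList]

theorem pvPrefixToken {a b c : List Char} (ha : ' ' ∉ a) (hb : ' ' ∉ b) :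
    (a ++ [' ']) <+: (b ++ ' ' :: c) ↔ a = b := by
  constructor
  · induction a generalizing b with
    | nil =>
      intro h
      cases b with
      | nil => rfl
      | cons y b' =>
        exfalso
        rw [List.nil_append, List.cons_append, List.cons_prefix_cons] at h
        exact hb (h.1 ▸ List.mem_cons_self)
    | cons x a' ih =>
      intro h
      cases b with
      | nil =>
        exfalso
        rw [List.cons_append, List.nil_append, List.cons_prefix_cons] at h
        exact ha (h.1 ▸ List.mem_cons_self)
      | cons y b' =>
        rw [List.cons_append, List.cons_append, List.cons_prefix_cons] at h
        have := ih (fun hx => ha (List.mem_cons_of_mem _ hx))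
          (fun hx => hb (List.mem_cons_of_mem _ hx)) h.2
        rw [h.1, this]
  · rintro rfl
    exact ⟨c, by simp⟩

theorem pvSpaceNotMemMapLower {l : List Char} (h : ' ' ∉ l) :
    ' ' ∉ l.map PySem.Chars.lowerChar := by
  intro hm
  obtain ⟨c, hc, hce⟩ := List.mem_map.mp hm
  exact h (((pvLowerChar_eq_space_iff c).mp hce) ▸ hc)

theorem pvCondIff (t p : String) (h₀ r₀ w : List Char)
    (hl : t.toList = h₀ ++ ' ' :: r₀) (hp : p.toList = w ++ [' '])
    (hh : ' ' ∉ h₀) (hw : ' ' ∉ w) :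
    PySem.Str.startswith (PySem.Str.lower t) p =
      decide (h₀.map PySem.Chars.lowerChar = w) := by
  apply pvBoolEqDecide
  rw [PySem.Str.startswith_eq, PySem.Str.toList_lower, PySem.Chars.startswith_iff, hp]
  unfold PySem.Chars.lower
  rw [hl, List.map_append, List.map_cons,
    show PySem.Chars.lowerChar ' ' = ' ' from rfl]
  rw [pvPrefixToken hw (pvSpaceNotMemMapLower hh)]
  exact eq_comm

theorem pvStartswithFalse (t p : String) (hns : ' ' ∉ t.toList) (hp : ' ' ∈ p.toList) :
    PySem.Str.startswith (PySem.Str.lower t) p = false := by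
  rw [Bool.eq_false_iff]
  intro h
  rw [PySem.Str.startswith_eq, PySem.Str.toList_lower, PySem.Chars.startswith_iff] at h
  have hmem : ' ' ∈ PySem.Chars.lower t.toList := h.subset hp
  unfold PySem.Chars.lower at hmem
  exact pvSpaceNotMemMapLower hns hmem

theorem pvSliceVal (t : String) (h₀ r₀ : List Char) (n : ℤ)
    (hl : t.toList = h₀ ++ ' ' :: r₀) (hn : n = (h₀.length : ℤ) + 1) :
    PySem.Str.strip (PySem.Str.slice t (some n) none) = PySem.Str.strip (String.ofList r₀) := by
  have h1 : (PySem.Str.slice t (some n) none).toList = r₀ := by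
    rw [PySem.Str.slice, String.toList_ofList, PySem.Chars.slice,
      PySem.List.slice_from _ (show (0:ℤ) ≤ n by omega), hn, hl]
    rw [show h₀ ++ ' ' :: r₀ = (h₀ ++ [' ']) ++ r₀ by simp]
    rw [List.drop_left' (by simp)]
  rw [PySem.Str.strip, PySem.Str.strip, h1, String.toList_ofList]

-- ===== VERDICT (by name: the statement is the Claim_ definition above) =====
theorem strip_connector_py_spec : Claim_equal_strip_connector_py := by
  intro text _
  unfold Spec_strip_connector_py strip_connector_py strip_connector_py_alt
  dsimp only
  set t := PySem.Str.strip text with ht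
  rw [pvSplit1 t]
  by_cases hsp : ' ' ∈ t.toList
  · rw [if_pos hsp]
    set h0 := t.toList.takeWhile (fun x => decide (x ≠ ' ')) with hh0
    set r0 := (t.toList.dropWhile (fun x => decide (x ≠ ' '))).tail with hr0
    have hh : ' ' ∉ h0 := by
      intro hm
      have := List.mem_takeWhile_imp hm
      simp at this
    have hd : t.toList.dropWhile (fun x => decide (x ≠ ' ')) ≠ [] := by
      intro hnil
      rw [List.dropWhile_eq_nil_iff] at hnil
      have := hnil ' ' hsp
      simp at this
    have hhead : (t.toList.dropWhile (fun x => decide (x ≠ ' '))).head hd = ' ' := by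
      have := List.head_dropWhile_not (fun x => decide (x ≠ ' ')) hd
      simpa using this
    have hcons := List.cons_head_tail hd
    rw [hhead] at hcons
    have hl : t.toList = h0 ++ ' ' :: r0 := by
      calc t.toList = t.toList.takeWhile (fun x => decide (x ≠ ' '))
            ++ t.toList.dropWhile (fun x => decide (x ≠ ' ')) := (List.takeWhile_append_dropWhile).symm
        _ = h0 ++ ' ' :: r0 := by rw [← hh0, ← hcons, hr0]
    have e1 := pvCondIff t "about " h0 r0 "about".toList hl rfl hh (by decide)
    have e2 := pvCondIff t "that " h0 r0 "that".toList hl rfl hh (by decide)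
    have e3 := pvCondIff t "regarding " h0 r0 "regarding".toList hl rfl hh (by decide)
    have e4 := pvCondIff t "concerning " h0 r0 "concerning".toList hl rfl hh (by decide)
    have e5 := pvCondIff t "of " h0 r0 "of".toList hl rfl hh (by decide)
    have hpc : pvConsumers = ["about", "that", "regarding", "concerning", "of"] := by decide
    have hof : ∀ (x : List Char) (s : String), (String.ofList x = s) ↔ x = s.toList := by
      intro x s
      constructor
      · intro h; rw [← h, String.toList_ofList]
      · intro h; rw [h, String.ofList_toList]
    have hBl : PySem.Str.lower (String.ofList h0) = String.ofList (h0.map PySem.Chars.lowerChar) := by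
      rw [PySem.Str.lower, String.toList_ofList]; rfl
    have hBcond : (PySem.Str.lower (String.ofList h0) ∈ pvConsumers) ↔
        (h0.map PySem.Chars.lowerChar = "about".toList ∨ h0.map PySem.Chars.lowerChar = "that".toList ∨
         h0.map PySem.Chars.lowerChar = "regarding".toList ∨ h0.map PySem.Chars.lowerChar = "concerning".toList ∨
         h0.map PySem.Chars.lowerChar = "of".toList) := by
      rw [hBl, hpc]
      simp only [List.mem_cons, List.not_mem_nil, or_false, hof]
    have hlen : ∀ (w : String), h0.map PySem.Chars.lowerChar = w.toList → (PySem.Str.len w + 1 : ℤ) = (h0.length : ℤ) + 1 := by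
      intro w hw
      have := congrArg List.length hw
      simp only [List.length_map] at this
      rw [PySem.Str.len_eq, this]
    dsimp only
    simp only [pvConnectorPrefixes, pvStripLoop, e1, e2, e3, e4, e5]
    by_cases h1 : h0.map PySem.Chars.lowerChar = "about".toList
    · rw [if_pos (decide_eq_true h1), if_pos (by decide),
        if_pos (hBcond.mpr (Or.inl h1))]
      exact pvSliceVal t h0 r0 _ hl (by have := hlen "about" h1; rw [show PySem.Str.len "about " = PySem.Str.len "about" + 1 from by decide]; omega)
    · rw [if_neg (by simp only [decide_eq_true_eq]; intro hx; exact h1 (by simpa using hx))]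
      by_cases h2 : h0.map PySem.Chars.lowerChar = "that".toList
      · rw [if_pos (decide_eq_true h2), if_pos (by decide),
          if_pos (hBcond.mpr (Or.inr (Or.inl h2)))]
        exact pvSliceVal t h0 r0 _ hl (by have := hlen "that" h2; rw [show PySem.Str.len "that " = PySem.Str.len "that" + 1 from by decide]; omega)
      · rw [if_neg (by simp only [decide_eq_true_eq]; intro hx; exact h2 (by simpa using hx))]
        by_cases h3 : h0.map PySem.Chars.lowerChar = "regarding".toList
        · rw [if_pos (decide_eq_true h3), if_pos (by decide),
            if_pos (hBcond.mpr (Or.inr (Or.inr (Or.inl h3))))]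
          exact pvSliceVal t h0 r0 _ hl (by have := hlen "regarding" h3; rw [show PySem.Str.len "regarding " = PySem.Str.len "regarding" + 1 from by decide]; omega)
        · rw [if_neg (by simp only [decide_eq_true_eq]; intro hx; exact h3 (by simpa using hx))]
          by_cases h4 : h0.map PySem.Chars.lowerChar = "concerning".toList
          · rw [if_pos (decide_eq_true h4), if_pos (by decide),
              if_pos (hBcond.mpr (Or.inr (Or.inr (Or.inr (Or.inl h4)))))]
            exact pvSliceVal t h0 r0 _ hl (by have := hlen "concerning" h4; rw [show PySem.Str.len "concerning " = PySem.Str.len "concerning" + 1 from by decide]; omega)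
          · rw [if_neg (by simp only [decide_eq_true_eq]; intro hx; exact h4 (by simpa using hx))]
            by_cases h5 : h0.map PySem.Chars.lowerChar = "of".toList
            · rw [if_pos (decide_eq_true h5), if_pos (by decide),
                if_pos (hBcond.mpr (Or.inr (Or.inr (Or.inr (Or.inr h5)))))]
              exact pvSliceVal t h0 r0 _ hl (by have := hlen "of" h5; rw [show PySem.Str.len "of " = PySem.Str.len "of" + 1 from by decide]; omega)
            · rw [if_neg (by simp only [decide_eq_true_eq]; intro hx; exact h5 (by simpa using hx))]
              simp only [show (["about ", "that ", "regarding ", "concerning ", "of "].contains ("if " : String)) = false from by decide,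
                show (["about ", "that ", "regarding ", "concerning ", "of "].contains ("whether " : String)) = false from by decide,
                show (["about ", "that ", "regarding ", "concerning ", "of "].contains ("where " : String)) = false from by decide,
                show (["about ", "that ", "regarding ", "concerning ", "of "].contains ("what " : String)) = false from by decide,
                show (["about ", "that ", "regarding ", "concerning ", "of "].contains ("why " : String)) = false from by decide,
                show (["about ", "that ", "regarding ", "concerning ", "of "].contains ("how " : String)) = false from by decide,
                show (["about ", "that ", "regarding ", "concerning ", "of "].contains ("who " : String)) = false from by decide,
                show (["about ", "that ", "regarding ", "concerning ", "of "].contains ("when " : String)) = false from by decide,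
                Bool.false_eq_true, if_false, ite_self]
              rw [if_neg (by
                intro hc
                rcases hBcond.mp hc with h | h | h | h | h
                · exact h1 h
                · exact h2 h
                · exact h3 h
                · exact h4 h
                · exact h5 h)]
  · rw [if_neg hsp]
    dsimp only
    simp only [pvConnectorPrefixes, pvStripLoop,
      pvStartswithFalse t "about " hsp (by decide),
      pvStartswithFalse t "that " hsp (by decide),
      pvStartswithFalse t "regarding " hsp (by decide),
      pvStartswithFalse t "concerning " hsp (by decide),
      pvStartswithFalse t "of " hsp (by decide),
      pvStartswithFalse t "if " hsp (by decide),
      pvStartswithFalse t "whether " hsp (by decide),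
      pvStartswithFalse t "where " hsp (by decide),
      pvStartswithFalse t "what " hsp (by decide),
      pvStartswithFalse t "why " hsp (by decide),
      pvStartswithFalse t "how " hsp (by decide),
      pvStartswithFalse t "who " hsp (by decide),
      pvStartswithFalse t "when " hsp (by decide),
      Bool.false_eq_true, if_false]
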